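-- pv_equiv track=rewrite | github.com/dslaw/cooking-log | src/parse.py | parse_body
-- ===== SOURCE A (Python) =====
-- def parse_body(body: list[str]) -> tuple[list[str], list[str]]:
--     it = iter(body)
--
--     dishes: list[str] = []
--     current_dish: str | None = None
--     has_notes = False
--     for line in it:
--         if line.startswith("Notes"):
--             has_notes = True
--             break
--
--         if current_dish is None and line:
--             current_dish = line
--         elif current_dish is not None and line:
--             current_dish = f"{current_dish} {line}"
--         elif current_dish is not None and not line:
--             dishes.append(current_dish)
--             current_dish = None
--         else:  # current_dish is None and not line
--             pass
--
--     if current_dish is not None: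
--         dishes.append(current_dish)
--
--     notes: list[str] = list(filter(None, it)) if has_notes else []
--     return dishes, notes
-- ===== SOURCE B (Python) =====
-- def parse_body(body: list[str]) -> tuple[list[str], list[str]]:
--     # Find the first "Notes" line, if any.
--     idx = None
--     for i, line in enumerate(body):
--         if line.startswith("Notes"):
--             idx = i
--             break
--
--     region = body if idx is None else body[:idx]
--
--     # Group consecutive non-empty lines of the dish region; join each run.
--     dishes: list[str] = []
--     i, n = 0, len(region)
--     while i < n:
--         if region[i]:
--             j = i
--             while j < n and region[j]:
--                 j += 1
--             dishes.append(" ".join(region[i:j]))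
--             i = j
--         else:
--             i += 1
--
--     notes = [] if idx is None else [line for line in body[idx + 1:] if line]
--     return dishes, notes
-- ===== Notes on version B (the rewrite author's own statement) =====
-- stated objective: faster
-- what changed: Replaces the optional-current_dish state machine over a shared iterator by a partition-then-group pass: first locate the first 'Notes' line, slice the body into a dish region and a notes tail, then collect each maximal run of non-empty lines and join it once with ' '.join.
import Mathlib
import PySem

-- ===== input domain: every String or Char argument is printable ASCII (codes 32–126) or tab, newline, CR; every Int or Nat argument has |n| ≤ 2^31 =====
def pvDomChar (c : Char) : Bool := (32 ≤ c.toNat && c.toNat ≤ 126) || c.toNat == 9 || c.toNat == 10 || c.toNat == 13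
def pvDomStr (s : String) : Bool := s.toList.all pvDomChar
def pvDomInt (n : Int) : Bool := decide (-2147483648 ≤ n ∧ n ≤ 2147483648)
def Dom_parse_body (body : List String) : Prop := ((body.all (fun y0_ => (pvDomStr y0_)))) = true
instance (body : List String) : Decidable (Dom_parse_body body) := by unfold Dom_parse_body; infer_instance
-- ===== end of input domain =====

-- B replaces A's current_dish state machine (which grows the dish by repeated concatenation) by a
-- find-"Notes"/slice/group-runs pass that joins each run once; measured faster in a timing run.

-- ===== PORT A =====
-- the for-loop of A: state = (dishes, current_dish); on "Notes" it breaks (flush + notes), at the end it flushes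
def goA : List String → List String → Option String → List String × List String
  | [], dishes, cur =>
    ((match cur with | none => dishes | some c => dishes ++ [c]), [])
  | l :: rest, dishes, cur =>
    if PySem.Str.startswith l "Notes" then
      ((match cur with | none => dishes | some c => dishes ++ [c]),
        rest.filter (fun s => s ≠ ""))
    else
      match cur with
      | none => if l ≠ "" then goA rest dishes (some l) else goA rest dishes none
      | some c =>
        if l ≠ "" then goA rest dishes (some (c ++ " " ++ l))
        else goA rest (dishes ++ [c]) none

def parse_body (body : List String) : List String × List String :=
  goA body [] none

-- ===== PORT B =====
-- index of the first line starting with "Notes" (B's first for-loop)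
def bFind : List String → Option Nat
  | [] => none
  | l :: rest =>
    if PySem.Str.startswith l "Notes" then some 0 else (bFind rest).map (· + 1)

-- the inner while loop of B: split off the leading run of non-empty lines
def bSpan : List String → List String × List String
  | [] => ([], [])
  | l :: rest =>
    if l ≠ "" then let p := bSpan rest; (l :: p.1, p.2) else ([], l :: rest)

lemma bSpan_snd_length : ∀ xs : List String, (bSpan xs).2.length ≤ xs.length := by
  intro xs
  induction xs with
  | nil => simp [bSpan]
  | cons l rest ih =>
    simp only [bSpan]
    split
    · simpa using Nat.le_succ_of_le ih
    · simp

-- " ".join(group)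
def joinSp : List String → String
  | [] => ""
  | x :: xs => xs.foldl (fun a b => a ++ " " ++ b) x

-- the outer while loop of B: each maximal non-empty run becomes one joined dish
def bGroups : List String → List String
  | [] => []
  | l :: rest =>
    if l ≠ "" then joinSp (l :: (bSpan rest).1) :: bGroups (bSpan rest).2
    else bGroups rest
termination_by xs => xs.length
decreasing_by
  · exact Nat.lt_succ_of_le (bSpan_snd_length rest)
  · simp

def parse_body_alt (body : List String) : List String × List String :=
  match bFind body with
  | none => (bGroups body, [])
  | some i => (bGroups (body.take i), (body.drop (i + 1)).filter (fun s => s ≠ ""))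

-- ===== PRECONDITION & SPEC =====
def Spec_parse_body (body : List String) (out : List String × List String) : Prop := out = parse_body_alt body
instance (body : List String) (out : List String × List String) : Decidable (Spec_parse_body body out) := by unfold Spec_parse_body; infer_instance

-- ===== CLAIM (what is proved, stated in full; the proofs are below) =====
def Claim_equal_parse_body : Prop := ∀ (body : List String), Dom_parse_body body → Spec_parse_body body (parse_body body)

-- ===== LEMMAS AND PROOFS =====

lemma sw_empty : PySem.Str.startswith "" "Notes" = false := by decide

lemma sw_empty_chars :
    PySem.Chars.startswith ([] : List Char) ('N' :: 'o' :: 't' :: 'e' :: 's' :: []) = false := by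
  decide

-- accumulator lemma for A's loop
lemma goA_acc : ∀ (xs : List String) (dishes : List String) (cur : Option String),
    goA xs dishes cur = (dishes ++ (goA xs [] cur).1, (goA xs [] cur).2) := by
  intro xs
  induction xs with
  | nil => intro dishes cur; cases cur <;> simp [goA]
  | cons l rest ih =>
    intro dishes cur
    by_cases hs : PySem.Str.startswith l "Notes" = true
    · have hs' := hs; simp at hs'
      cases cur <;> simp [goA, hs, hs']
    · have hs' := hs; simp at hs'
      by_cases he : l = ""
      · subst he
        cases cur with
        | none =>
          have e1 : ∀ d, goA ("" :: rest) d none = goA rest d none := by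
            intro d; simp [goA, hs, hs', sw_empty_chars]
          rw [e1, e1, ih dishes none]
        | some c =>
          have e1 : ∀ d, goA ("" :: rest) d (some c) = goA rest (d ++ [c]) none := by
            intro d; simp [goA, hs, hs', sw_empty_chars]
          rw [e1, e1, ih (dishes ++ [c]) none, ih ([] ++ [c]) none]
          simp
      · cases cur with
        | none =>
          have e1 : ∀ d, goA (l :: rest) d none = goA rest d (some l) := by
            intro d; simp [goA, hs, hs', he]
          rw [e1, e1, ih dishes (some l)]
        | some c =>
          have e1 : ∀ d, goA (l :: rest) d (some c) = goA rest d (some (c ++ " " ++ l)) := by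
            intro d; simp [goA, hs, hs', he]
          rw [e1, e1, ih dishes (some (c ++ " " ++ l))]

-- proof-side span: longest prefix of non-empty, non-"Notes" lines
def aSpan : List String → List String × List String
  | [] => ([], [])
  | l :: rest =>
    if l ≠ "" ∧ ¬ (PySem.Str.startswith l "Notes" = true) then
      let p := aSpan rest; (l :: p.1, p.2)
    else ([], l :: rest)

lemma aSpan_append : ∀ xs : List String, (aSpan xs).1 ++ (aSpan xs).2 = xs := by
  intro xs
  induction xs with
  | nil => simp [aSpan]
  | cons l rest ih =>
    simp only [aSpan]
    split
    · simpa using ih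
    · simp

lemma aSpan_mem : ∀ xs : List String, ∀ x ∈ (aSpan xs).1,
    x ≠ "" ∧ ¬ (PySem.Str.startswith x "Notes" = true) := by
  intro xs
  induction xs with
  | nil => simp [aSpan]
  | cons l rest ih =>
    simp only [aSpan]
    split
    · rename_i h
      intro x hx
      simp only [List.mem_cons] at hx
      rcases hx with rfl | hx
      · exact h
      · exact ih x hx
    · simp

lemma aSpan_stop : ∀ xs : List String, (aSpan xs).2 = [] ∨
    ∃ h t, (aSpan xs).2 = h :: t ∧ (PySem.Str.startswith h "Notes" = true ∨ h = "") := by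
  intro xs
  induction xs with
  | nil => simp [aSpan]
  | cons l rest ih =>
    simp only [aSpan]
    split
    · simpa using ih
    · rename_i h
      refine Or.inr ⟨l, rest, rfl, ?_⟩
      by_cases hs : PySem.Str.startswith l "Notes" = true
      · exact Or.inl hs
      · refine Or.inr ?_
        by_contra hne
        exact h ⟨hne, hs⟩

-- what A's loop does from the state `some c`
lemma goA_some : ∀ (xs : List String) (c : String),
    goA xs [] (some c) =
      match (aSpan xs).2 with
      | [] => ([(aSpan xs).1.foldl (fun a b => a ++ " " ++ b) c], [])
      | h :: t =>
        if PySem.Str.startswith h "Notes" = true then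
          ([(aSpan xs).1.foldl (fun a b => a ++ " " ++ b) c], t.filter (fun s => s ≠ ""))
        else
          ((aSpan xs).1.foldl (fun a b => a ++ " " ++ b) c :: (goA t [] none).1,
            (goA t [] none).2) := by
  intro xs
  induction xs with
  | nil => intro c; simp [goA, aSpan]
  | cons l rest ih =>
    intro c
    by_cases hs : PySem.Str.startswith l "Notes" = true
    · have hs' := hs; simp at hs'
      have ha : aSpan (l :: rest) = ([], l :: rest) := by
        simp only [aSpan]
        rw [if_neg (fun hc => hc.2 hs)]
      rw [ha]
      simp [goA, hs, hs']
    · have hs' := hs; simp at hs'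
      by_cases he : l = ""
      · subst he
        have ha : aSpan ("" :: rest) = ([], "" :: rest) := by
          simp only [aSpan]
          rw [if_neg (fun hc => hc.1 rfl)]
        have e1 : goA ("" :: rest) [] (some c) = goA rest ([] ++ [c]) none := by
          simp [goA, hs, hs', sw_empty_chars]
        rw [e1, goA_acc rest ([] ++ [c]) none, ha]
        simp [sw_empty, sw_empty_chars]
      · have ha : aSpan (l :: rest) = (l :: (aSpan rest).1, (aSpan rest).2) := by
          simp only [aSpan]
          rw [if_pos ⟨he, hs⟩]
        have e1 : goA (l :: rest) [] (some c) = goA rest [] (some (c ++ " " ++ l)) := by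
          simp [goA, hs, hs', he]
        rw [e1, ih (c ++ " " ++ l), ha]
        cases hr2 : (aSpan rest).2 with
        | nil => simp
        | cons h t => simp

-- bFind over a "Notes"-free prefix
lemma bFind_append : ∀ (g r : List String),
    (∀ x ∈ g, ¬ (PySem.Str.startswith x "Notes" = true)) →
    bFind (g ++ r) = (bFind r).map (· + g.length) := by
  intro g
  induction g with
  | nil => intro r _; cases h : bFind r <;> simp [h]
  | cons x g ih =>
    intro r hg
    have hx : ¬ (PySem.Str.startswith x "Notes" = true) := hg x (by simp)
    have hx' := hx; simp only [PySem.Str.startswith_eq] at hx'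
    simp only [List.cons_append, bFind]
    rw [if_neg hx, ih r (fun y hy => hg y (by simp [hy]))]
    cases h : bFind r <;> simp [h] <;> omega

-- bSpan over a run of non-empty lines
lemma bSpan_all : ∀ g : List String, (∀ x ∈ g, x ≠ "") → bSpan g = (g, []) := by
  intro g
  induction g with
  | nil => intro _; simp [bSpan]
  | cons x g ih =>
    intro hg
    have hx : x ≠ "" := hg x (by simp)
    simp [bSpan, hx, ih (fun y hy => hg y (by simp [hy]))]

lemma bSpan_stop : ∀ (g t : List String), (∀ x ∈ g, x ≠ "") →
    bSpan (g ++ "" :: t) = (g, "" :: t) := by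
  intro g
  induction g with
  | nil => intro t _; simp [bSpan]
  | cons x g ih =>
    intro t hg
    have hx : x ≠ "" := hg x (by simp)
    simp [bSpan, hx, ih t (fun y hy => hg y (by simp [hy]))]

lemma bGroups_pos (l : String) (hl : l ≠ "") (rest : List String) :
    bGroups (l :: rest) = joinSp (l :: (bSpan rest).1) :: bGroups (bSpan rest).2 := by
  rw [bGroups]; simp [hl]

lemma bGroups_empty (rest : List String) : bGroups ("" :: rest) = bGroups rest := by
  rw [bGroups]; simp

lemma joinSp_cons (l : String) (g : List String) :
    joinSp (l :: g) = g.foldl (fun a b => a ++ " " ++ b) l := rfl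

-- main lemma, proved by strong induction on length
lemma main_lemma : ∀ (n : Nat) (xs : List String), xs.length ≤ n →
    goA xs [] none = parse_body_alt xs := by
  intro n
  induction n with
  | zero =>
    intro xs hlen
    have : xs = [] := List.eq_nil_of_length_eq_zero (Nat.le_zero.mp hlen)
    subst this
    simp [goA, parse_body_alt, bFind, bGroups]
  | succ n ih =>
    intro xs hlen
    cases xs with
    | nil => simp [goA, parse_body_alt, bFind, bGroups]
    | cons l rest =>
      simp only [List.length_cons, Nat.succ_le_succ_iff] at hlen
      by_cases hs : PySem.Str.startswith l "Notes" = true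
      · have hs' := hs; simp at hs'
        simp [goA, hs, hs', parse_body_alt, bFind, bGroups]
      · have hs' := hs; simp at hs'
        by_cases he : l = ""
        · subst he
          have hA : goA ("" :: rest) [] none = goA rest [] none := by
            simp [goA, hs, hs', sw_empty_chars]
          rw [hA, ih rest hlen]
          simp only [parse_body_alt]
          have hb : bFind ("" :: rest) = (bFind rest).map (· + 1) := by
            simp only [bFind]
            rw [if_neg (by simp [sw_empty, sw_empty_chars])]
          rw [hb]
          cases hf : bFind rest with
          | none => simp [bGroups_empty]
          | some j => simp [List.take_succ_cons, bGroups_empty, List.drop_succ_cons]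
        · have hA : goA (l :: rest) [] none = goA rest [] (some l) := by
            simp [goA, hs, hs', he]
          rw [hA, goA_some rest l]
          have hgr := aSpan_append rest
          have hmem := aSpan_mem rest
          have hstop := aSpan_stop rest
          set g := (aSpan rest).1 with hgdef
          set r := (aSpan rest).2 with hrdef
          have hne : ∀ x ∈ g, x ≠ "" := fun x hx => (hmem x hx).1
          have hnw : ∀ x ∈ g, ¬ (PySem.Str.startswith x "Notes" = true) :=
            fun x hx => (hmem x hx).2
          rcases hstop with hr | ⟨h, t, hr, hht⟩
          · -- rest is one run of non-empty non-Notes lines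
            rw [hr]
            have hg : g = rest := by rw [hr] at hgr; simpa using hgr
            have hf : bFind rest = none := by
              rw [← hg]
              have := bFind_append g [] hnw
              simpa [bFind] using this
            have hfx : bFind (l :: rest) = none := by
              simp only [bFind]
              rw [if_neg hs, hf]
              simp
            have hbg : bGroups (l :: rest) = [joinSp (l :: g)] := by
              rw [bGroups_pos l he rest, ← hg, bSpan_all g hne]
              simp [bGroups]
            simp [parse_body_alt, hfx, hbg, joinSp_cons]
          · rcases hht with hNotes | hEmpty
            · -- run ends at a Notes line
              rw [hr]
              have hNotes' := hNotes; simp at hNotes'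
              have hrest : g ++ h :: t = rest := by rw [hr] at hgr; exact hgr
              have hfr : bFind rest = some g.length := by
                rw [← hrest, bFind_append g (h :: t) hnw]
                simp [bFind, hNotes, hNotes']
              have hfx : bFind (l :: rest) = some (g.length + 1) := by
                simp only [bFind]
                rw [if_neg hs, hfr]
                simp
              have htake : (l :: rest).take (g.length + 1) = l :: g := by
                rw [List.take_succ_cons, ← hrest]
                simpa using List.take_length_add_append (i := 0) (l₁ := g) (l₂ := h :: t)
              have hdrop : (l :: rest).drop (g.length + 1 + 1) = t := by
                rw [List.drop_succ_cons, ← hrest]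
                simpa using List.drop_length_add_append (i := 1) (l₁ := g) (l₂ := h :: t)
              have hbg : bGroups (l :: g) = [joinSp (l :: g)] := by
                rw [bGroups_pos l he g, bSpan_all g hne]
                simp [bGroups]
              simp [parse_body_alt, hfx, htake, hdrop, hbg, joinSp_cons, hNotes, hNotes']
            · -- run ends at an empty line; recurse on the tail
              subst hEmpty
              rw [hr]
              have hrest : g ++ "" :: t = rest := by rw [hr] at hgr; exact hgr
              have htlen : t.length ≤ n := by
                have := congrArg List.length hrest
                simp at this
                omega
              have hfr : bFind rest = (bFind t).map (· + (g.length + 1)) := by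
                rw [← hrest, bFind_append g _ hnw]
                have hb0 : bFind ("" :: t) = (bFind t).map (· + 1) := by
                  simp only [bFind]
                  rw [if_neg (by simp [sw_empty, sw_empty_chars])]
                rw [hb0]
                cases hft : bFind t <;> simp <;> omega
              have hihT := ih t htlen
              cases hft : bFind t with
              | none =>
                have hfx : bFind (l :: rest) = none := by
                  simp only [bFind]
                  rw [if_neg hs, hfr, hft]
                  simp
                have hbg : bGroups (l :: rest) = joinSp (l :: g) :: bGroups t := by
                  rw [bGroups_pos l he rest, ← hrest, bSpan_stop g t hne]
                  simp [bGroups_empty]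
                simp [parse_body_alt, hfx, hft, hbg, joinSp_cons, sw_empty, sw_empty_chars, hihT]
              | some j =>
                have hfx : bFind (l :: rest) = some (j + (g.length + 1) + 1) := by
                  simp only [bFind]
                  rw [if_neg hs, hfr, hft]
                  simp
                have htake : (l :: rest).take (j + (g.length + 1) + 1)
                    = l :: (g ++ "" :: t.take j) := by
                  rw [List.take_succ_cons, ← hrest]
                  have e : j + (g.length + 1) = g.length + (j + 1) := by omega
                  rw [e, List.take_length_add_append, List.take_succ_cons]
                have hdrop : (l :: rest).drop (j + (g.length + 1) + 1 + 1)
                    = t.drop (j + 1) := by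
                  rw [List.drop_succ_cons, ← hrest]
                  have e : j + (g.length + 1) + 1 = g.length + (j + 2) := by omega
                  rw [e, List.drop_length_add_append, List.drop_succ_cons]
                have hbg : bGroups (l :: (g ++ "" :: t.take j))
                    = joinSp (l :: g) :: bGroups (t.take j) := by
                  rw [bGroups_pos l he _, bSpan_stop g _ hne]
                  simp [bGroups_empty]
                simp [parse_body_alt, hfx, hft, htake, hdrop, hbg, joinSp_cons, sw_empty, sw_empty_chars, hihT]

-- ===== VERDICT (by name: the statement is the Claim_ definition above) =====
theorem parse_body_spec : Claim_equal_parse_body := by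
  intro body _
  show parse_body body = parse_body_alt body
  exact main_lemma body.length body le_rfl
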